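-- pv_equiv track=rewrite | github.com/reversebutterfly/sam2-pre-new | scripts/measure_fidelity.py | build_mod_to_orig
-- ===== SOURCE A (Python) =====
-- ATTACK_PREFIX = 15  # Must match run_two_regimes.py default
--
-- INSERT_MOD_INDICES_15 = [4, 9, 14]  # Inserts after orig 3, 7, 11
--
-- def build_mod_to_orig(T_mod, T_orig, attack_prefix=ATTACK_PREFIX):
--     """Return (m2o, insert_mod_indices).
--
--     m2o[mi] = orig index, or -1 for insert. For the standard
--     attack_prefix=15 + 3-insert schedule, inserts are at mod indices
--     {4, 9, 14}. If the frame-count difference is not 3, falls back to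
--     even spacing over the prefix.
--     """
--     n_ins = T_mod - T_orig
--     if n_ins == 3 and attack_prefix == 15:
--         ins = list(INSERT_MOD_INDICES_15)
--     else:
--         # Even spacing
--         ins = []
--         step = max(1, (attack_prefix + n_ins) // (n_ins + 1))
--         for i in range(n_ins):
--             ins.append(min((i + 1) * step + i, attack_prefix + n_ins - 1))
--     ins_set = set(ins)
--     m2o = []
--     oi = 0
--     for mi in range(T_mod):
--         if mi in ins_set:
--             m2o.append(-1)
--         else:
--             m2o.append(oi)
--             oi += 1
--     return m2o, sorted(ins_set)
-- ===== SOURCE B (Python) =====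
-- ATTACK_PREFIX = 15
--
-- INSERT_MOD_INDICES_15 = [4, 9, 14]
--
-- def build_mod_to_orig(T_mod, T_orig, attack_prefix=ATTACK_PREFIX):
--     """Iterate only over the sorted deduplicated insert positions, emitting the
--     run of consecutive kept original indices before each -1 sentinel, instead
--     of scanning every mod index with a set-membership test."""
--     n_ins = T_mod - T_orig
--     if n_ins == 3 and attack_prefix == 15:
--         ins_unique = list(INSERT_MOD_INDICES_15)
--     else:
--         step = max(1, (attack_prefix + n_ins) // (n_ins + 1))
--         cap = attack_prefix + n_ins - 1
--         ins_unique = sorted({min((i + 1) * step + i, cap) for i in range(n_ins)})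
--     m2o = []
--     oi = 0
--     for p in ins_unique:
--         if 0 <= p < T_mod:
--             seg = p - len(m2o)
--             m2o.extend(range(oi, oi + seg))
--             oi += seg
--             m2o.append(-1)
--     m2o.extend(range(oi, oi + (T_mod - len(m2o))))
--     return m2o, ins_unique
-- ===== Notes on version B (the rewrite author's own statement) =====
-- stated objective: alternative
-- what changed: Instead of scanning every mod index with a set-membership test and a running original-index counter, B iterates only over the sorted deduplicated insert positions, emitting the run of consecutive kept original indices before each -1 sentinel and one final run.
import Mathlib
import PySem

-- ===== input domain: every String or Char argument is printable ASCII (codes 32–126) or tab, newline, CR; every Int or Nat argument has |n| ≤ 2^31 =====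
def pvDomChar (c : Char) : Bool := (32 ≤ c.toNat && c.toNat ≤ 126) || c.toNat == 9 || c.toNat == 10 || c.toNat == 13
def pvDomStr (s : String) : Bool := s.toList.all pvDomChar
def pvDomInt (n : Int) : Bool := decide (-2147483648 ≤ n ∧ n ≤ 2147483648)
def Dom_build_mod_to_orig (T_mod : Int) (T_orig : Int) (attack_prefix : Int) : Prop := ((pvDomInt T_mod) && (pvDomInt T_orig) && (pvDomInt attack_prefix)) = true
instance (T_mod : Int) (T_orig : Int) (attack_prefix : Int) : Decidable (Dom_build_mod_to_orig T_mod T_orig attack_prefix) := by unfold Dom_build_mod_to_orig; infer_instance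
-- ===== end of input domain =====

-- B splices -1 sentinels into a prebuilt kept-index list instead of A's scan of
-- every mod index with a set-membership test and a running counter (objective:
-- alternative decomposition, same cost).

-- ===== PORT A =====
def build_mod_to_orig (T_mod : Int) (T_orig : Int) (attack_prefix : Int) : List Int × List Int :=
  let n_ins := T_mod - T_orig
  let ins : List Int :=
    if n_ins = 3 ∧ attack_prefix = 15 then [4, 9, 14]
    else
      let step := max 1 (PySem.Int.floordiv (attack_prefix + n_ins) (n_ins + 1))
      (PySem.List.pyRange 0 n_ins 1).foldl
        (fun acc i => acc ++ [min ((i + 1) * step + i) (attack_prefix + n_ins - 1)]) []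
  let ins_set : PySem.Set Int := PySem.Set.ofList ins
  let st :=
    (PySem.List.pyRange 0 T_mod 1).foldl
      (fun (st : List Int × Int) mi =>
        if PySem.Set.contains ins_set mi then (st.1 ++ [(-1 : Int)], st.2)
        else (st.1 ++ [st.2], st.2 + 1)) ([], 0)
  (st.1, PySem.List.sorted ins_set (fun x => x) false)

-- ===== PORT B =====
def build_mod_to_orig_alt (T_mod : Int) (T_orig : Int) (attack_prefix : Int) : List Int × List Int :=
  let n_ins := T_mod - T_orig
  let ins_unique : List Int :=
    if n_ins = 3 ∧ attack_prefix = 15 then [4, 9, 14]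
    else
      let step := max 1 (PySem.Int.floordiv (attack_prefix + n_ins) (n_ins + 1))
      let cap := attack_prefix + n_ins - 1
      PySem.List.sorted
        (PySem.Set.ofList ((PySem.List.pyRange 0 n_ins 1).map (fun i => min ((i + 1) * step + i) cap)))
        (fun x => x) false
  let st :=
    ins_unique.foldl
      (fun (st : List Int × Int) p =>
        if decide (0 ≤ p) && decide (p < T_mod) then
          (st.1 ++ PySem.List.pyRange st.2 (st.2 + (p - (st.1.length : Int))) 1 ++ [(-1 : Int)],
           st.2 + (p - (st.1.length : Int)))
        else st) ([], 0)
  let m2o := st.1 ++ PySem.List.pyRange st.2 (st.2 + (T_mod - (st.1.length : Int))) 1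
  (m2o, ins_unique)

-- ===== PRECONDITION & SPEC =====
-- Pre_ excludes exactly T_mod - T_orig = -1 (outside the fixed 3-insert case),
-- where Python A raises ZeroDivisionError in `(attack_prefix + n_ins) // (n_ins + 1)`.
def Pre_build_mod_to_orig (T_mod : Int) (T_orig : Int) (attack_prefix : Int) : Prop :=
  T_mod - T_orig ≠ -1
instance (T_mod : Int) (T_orig : Int) (attack_prefix : Int) : Decidable (Pre_build_mod_to_orig T_mod T_orig attack_prefix) := by unfold Pre_build_mod_to_orig; infer_instance

def pvWitness_build_mod_to_orig : Int × Int × Int := (18, 15, 15)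

def Spec_build_mod_to_orig (T_mod : Int) (T_orig : Int) (attack_prefix : Int) (out : List Int × List Int) : Prop := out = build_mod_to_orig_alt T_mod T_orig attack_prefix
instance (T_mod : Int) (T_orig : Int) (attack_prefix : Int) (out : List Int × List Int) : Decidable (Spec_build_mod_to_orig T_mod T_orig attack_prefix out) := by unfold Spec_build_mod_to_orig; infer_instance

-- ===== CLAIM (what is proved, stated in full; the proofs are below) =====
def Claim_equal_build_mod_to_orig : Prop := ∀ (T_mod : Int) (T_orig : Int) (attack_prefix : Int), Dom_build_mod_to_orig T_mod T_orig attack_prefix → Pre_build_mod_to_orig T_mod T_orig attack_prefix → Spec_build_mod_to_orig T_mod T_orig attack_prefix (build_mod_to_orig T_mod T_orig attack_prefix)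

-- ===== LEMMAS AND PROOFS =====

-- A's scan loop over a hole-free stretch appends consecutive original indices.
lemma pvScanNohole (P : Int → Bool) :
    ∀ (L : List Int) (acc : List Int) (oi : Int), (∀ x ∈ L, P x = false) →
    L.foldl (fun (st : List Int × Int) mi =>
        if P mi then (st.1 ++ [(-1 : Int)], st.2) else (st.1 ++ [st.2], st.2 + 1)) (acc, oi)
      = (acc ++ PySem.List.pyRange oi (oi + (L.length : Int)) 1, oi + (L.length : Int)) := by
  intro L
  induction L with
  | nil => intro acc oi _; simp [PySem.List.pyRange_one_eq_nil]
  | cons x t ih =>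
    intro acc oi hP
    have hx : P x = false := hP x (by simp)
    simp only [List.foldl_cons, hx, Bool.false_eq_true, if_false]
    rw [ih (acc ++ [oi]) (oi + 1) (fun y hy => hP y (by simp [hy]))]
    have hcons : PySem.List.pyRange oi (oi + ((t.length : Int) + 1)) 1
        = oi :: PySem.List.pyRange (oi + 1) (oi + ((t.length : Int) + 1)) 1 :=
      PySem.List.pyRange_one_cons (by omega)
    simp only [List.length_cons]
    push_cast
    rw [show oi + 1 + (t.length : Int) = oi + ((t.length : Int) + 1) from by ring, hcons]
    simp

-- A's scan appends exactly one output per scanned index.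
lemma pvScanLength (P : Int → Bool) :
    ∀ (L : List Int) (acc : List Int) (oi : Int),
    ((L.foldl (fun (st : List Int × Int) mi =>
        if P mi then (st.1 ++ [(-1 : Int)], st.2) else (st.1 ++ [st.2], st.2 + 1)) (acc, oi)).1).length
      = acc.length + L.length := by
  intro L
  induction L with
  | nil => intro acc oi; simp
  | cons x t ih =>
    intro acc oi
    cases hx : P x
    · simp only [List.foldl_cons, hx, Bool.false_eq_true, if_false, ih, List.length_append,
        List.length_cons, List.length_nil]
      omega
    · simp only [List.foldl_cons, hx, if_true, ih, List.length_append, List.length_cons,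
        List.length_nil]
      omega

-- Core loop fact: A's counter scan over range(n) equals B's run-emitting merge
-- over the ascending hole list H.
lemma pvScanSeg : ∀ (H : List Int), ∀ (n : Int) (P : Int → Bool),
    H.Pairwise (· < ·) → (∀ h ∈ H, 0 ≤ h ∧ h < n) → 0 ≤ n →
    (∀ mi : Int, 0 ≤ mi → mi < n → (P mi = true ↔ mi ∈ H)) →
    (PySem.List.pyRange 0 n 1).foldl
        (fun (st : List Int × Int) mi =>
          if P mi then (st.1 ++ [(-1 : Int)], st.2) else (st.1 ++ [st.2], st.2 + 1)) ([], 0)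
      = ((H.foldl (fun (st : List Int × Int) p =>
              (st.1 ++ PySem.List.pyRange st.2 (st.2 + (p - (st.1.length : Int))) 1 ++ [(-1 : Int)],
               st.2 + (p - (st.1.length : Int)))) ([], 0)).1
          ++ PySem.List.pyRange
              (H.foldl (fun (st : List Int × Int) p =>
                (st.1 ++ PySem.List.pyRange st.2 (st.2 + (p - (st.1.length : Int))) 1 ++ [(-1 : Int)],
                 st.2 + (p - (st.1.length : Int)))) ([], 0)).2
              ((H.foldl (fun (st : List Int × Int) p =>
                (st.1 ++ PySem.List.pyRange st.2 (st.2 + (p - (st.1.length : Int))) 1 ++ [(-1 : Int)],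
                 st.2 + (p - (st.1.length : Int)))) ([], 0)).2
               + (n - (((H.foldl (fun (st : List Int × Int) p =>
                  (st.1 ++ PySem.List.pyRange st.2 (st.2 + (p - (st.1.length : Int))) 1 ++ [(-1 : Int)],
                   st.2 + (p - (st.1.length : Int)))) ([], 0)).1).length : Int))) 1,
         (H.foldl (fun (st : List Int × Int) p =>
            (st.1 ++ PySem.List.pyRange st.2 (st.2 + (p - (st.1.length : Int))) 1 ++ [(-1 : Int)],
             st.2 + (p - (st.1.length : Int)))) ([], 0)).2
          + (n - (((H.foldl (fun (st : List Int × Int) p =>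
              (st.1 ++ PySem.List.pyRange st.2 (st.2 + (p - (st.1.length : Int))) 1 ++ [(-1 : Int)],
               st.2 + (p - (st.1.length : Int)))) ([], 0)).1).length : Int))) := by
  intro H
  induction H using List.reverseRecOn with
  | nil =>
    intro n P _ _ hn hP
    have hfalse : ∀ x ∈ PySem.List.pyRange 0 n 1, P x = false := by
      intro x hx
      rcases (PySem.List.mem_pyRange_one).mp hx with ⟨hx0, hxn⟩
      have := hP x hx0 hxn
      simp at this
      simpa using this
    rw [pvScanNohole P _ [] 0 hfalse]
    simp only [PySem.List.length_pyRange_one, List.foldl_nil, List.length_nil, List.nil_append]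
    have h1 : ((n - 0).toNat : Int) = n := by omega
    rw [h1]
    norm_num
  | append_singleton hs p ihh =>
    intro n P hpw hb hn hP
    have hsplit := List.pairwise_append.mp hpw
    have hpw' : hs.Pairwise (· < ·) := hsplit.1
    have hlt : ∀ x ∈ hs, x < p := by
      intro x hx; exact hsplit.2.2 x hx p (by simp)
    have hp := hb p (by simp)
    have hPp : P p = true := (hP p hp.1 hp.2).mpr (by simp)
    have hscan := ihh p P hpw' (fun h hh => ⟨(hb h (by simp [hh])).1, hlt h hh⟩) (by omega)
      (by
        intro mi h0 hmi
        have hmm := hP mi h0 (by omega)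
        simp only [List.mem_append, List.mem_singleton] at hmm
        constructor
        · intro hPt
          rcases hmm.mp hPt with h1 | h2
          · exact h1
          · omega
        · intro hm; exact hmm.mpr (Or.inl hm))
    have hlen := pvScanLength P (PySem.List.pyRange 0 p 1) [] 0
    rw [hscan] at hlen
    simp only [List.length_nil, List.length_append, List.length_cons, PySem.List.length_pyRange_one, Nat.zero_add] at hlen
    -- split the scanned range at p and p+1
    rw [PySem.List.pyRange_one_append 0 (p+1) n (by omega) (by omega),
        PySem.List.pyRange_one_succ_right (by omega : (0:Int) ≤ p)]
    rw [List.foldl_append, List.foldl_append, hscan]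
    set s := hs.foldl (fun (st : List Int × Int) p =>
        (st.1 ++ PySem.List.pyRange st.2 (st.2 + (p - (st.1.length : Int))) 1 ++ [(-1 : Int)],
         st.2 + (p - (st.1.length : Int)))) ([], 0) with hsdef
    -- the hole p itself
    simp only [List.foldl_cons, List.foldl_nil, hPp, if_true]
    -- the hole-free tail (p, n)
    rw [pvScanNohole P _ _ _ (by
      intro x hx
      rcases (PySem.List.mem_pyRange_one).mp hx with ⟨hx1, hx2⟩
      have hiff := hP x (by omega) hx2
      have hnm : x ∉ hs ++ [p] := by
        simp only [List.mem_append, List.mem_singleton]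
        rintro (hm | rfl)
        · have := hlt x hm; omega
        · omega
      cases hPx : P x
      · rfl
      · exact absurd (hiff.mp hPx) hnm)]
    rw [List.foldl_append]
    simp only [List.foldl_cons, List.foldl_nil]
    rw [← hsdef]
    simp only [Prod.mk.injEq, List.append_assoc, PySem.List.length_pyRange_one,
      List.length_append, List.length_cons, List.length_nil]
    have he : s.2 + (p - (s.1.length : Int)) + (((n - (p + 1)).toNat : Nat) : Int)
        = s.2 + (p - (s.1.length : Int))
          + (n - ((s.1.length + ((s.2 + (p - (s.1.length : Int)) - s.2).toNat + 1) : Nat) : Int)) := by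
      push_cast
      omega
    rw [he]
    exact ⟨rfl, rfl⟩

-- The two first components agree for any insert list L (S = sorted(set(L))).
lemma pvCore (n : Int) (L S : List Int)
    (hS : S = PySem.List.sorted (PySem.Set.ofList L) (fun x => x) false) :
    ((PySem.List.pyRange 0 n 1).foldl
        (fun (st : List Int × Int) mi =>
          if PySem.Set.contains (PySem.Set.ofList L) mi then (st.1 ++ [(-1 : Int)], st.2)
          else (st.1 ++ [st.2], st.2 + 1)) ([], 0)).1
      = (S.foldl
          (fun (st : List Int × Int) p =>
            if decide (0 ≤ p) && decide (p < n) then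
              (st.1 ++ PySem.List.pyRange st.2 (st.2 + (p - (st.1.length : Int))) 1 ++ [(-1 : Int)],
               st.2 + (p - (st.1.length : Int)))
            else st) ([], 0)).1
        ++ PySem.List.pyRange
            (S.foldl
              (fun (st : List Int × Int) p =>
                if decide (0 ≤ p) && decide (p < n) then
                  (st.1 ++ PySem.List.pyRange st.2 (st.2 + (p - (st.1.length : Int))) 1 ++ [(-1 : Int)],
                   st.2 + (p - (st.1.length : Int)))
                else st) ([], 0)).2
            ((S.foldl
              (fun (st : List Int × Int) p =>
                if decide (0 ≤ p) && decide (p < n) then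
                  (st.1 ++ PySem.List.pyRange st.2 (st.2 + (p - (st.1.length : Int))) 1 ++ [(-1 : Int)],
                   st.2 + (p - (st.1.length : Int)))
                else st) ([], 0)).2
             + (n - (((S.foldl
                (fun (st : List Int × Int) p =>
                  if decide (0 ≤ p) && decide (p < n) then
                    (st.1 ++ PySem.List.pyRange st.2 (st.2 + (p - (st.1.length : Int))) 1 ++ [(-1 : Int)],
                     st.2 + (p - (st.1.length : Int)))
                  else st) ([], 0)).1).length : Int))) 1 := by
  rw [← List.foldl_filter]
  set H := S.filter (fun p => decide (0 ≤ p) && decide (p < n)) with hHdef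
  have hSpw : S.Pairwise (· < ·) := by
    rw [hS]; exact PySem.List.sorted_ofList_pairwise_lt (xs := L)
  have hHpw : H.Pairwise (· < ·) := List.Pairwise.sublist List.filter_sublist hSpw
  have hHb : ∀ h ∈ H, 0 ≤ h ∧ h < n := by
    intro h hh
    rcases List.mem_filter.mp hh with ⟨_, hcond⟩
    simpa using hcond
  have hmemH : ∀ mi : Int, 0 ≤ mi → mi < n →
      (PySem.Set.contains (PySem.Set.ofList L) mi = true ↔ mi ∈ H) := by
    intro mi h0 hn
    rw [PySem.Set.contains_iff, PySem.Set.mem_ofList, hHdef, List.mem_filter]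
    constructor
    · intro hm
      refine ⟨?_, by simpa using ⟨h0, hn⟩⟩
      rw [hS, PySem.List.mem_sorted, PySem.Set.mem_ofList]
      exact hm
    · intro ⟨hm, _⟩
      rw [hS, PySem.List.mem_sorted, PySem.Set.mem_ofList] at hm
      exact hm
  by_cases hn : 0 ≤ n
  · rw [pvScanSeg H n _ hHpw hHb hn hmemH]
  · have hH : H = [] := by
      rw [hHdef]
      apply List.filter_eq_nil_iff.mpr
      intro p _
      simp only [Bool.and_eq_true, decide_eq_true_eq]
      omega
    rw [hH]
    simp only [List.foldl_nil, List.length_nil]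
    rw [PySem.List.pyRange_one_eq_nil (by omega), PySem.List.pyRange_one_eq_nil (by omega)]
    simp

-- ===== VERDICT (by name: the statement is the Claim_ definition above) =====
theorem build_mod_to_orig_spec : Claim_equal_build_mod_to_orig := by
  intro T_mod T_orig attack_prefix _ _
  unfold Spec_build_mod_to_orig build_mod_to_orig build_mod_to_orig_alt
  by_cases hc : T_mod - T_orig = 3 ∧ attack_prefix = 15
  · simp only [if_pos hc, Prod.mk.injEq]
    exact ⟨pvCore T_mod [4, 9, 14] [4, 9, 14] (by decide), by decide⟩
  · simp only [if_neg hc, PySem.List.foldl_append_singleton_eq_map, List.nil_append, Prod.mk.injEq]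
    exact ⟨pvCore T_mod _ _ rfl, trivial⟩
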